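-- pv_equiv track=rewrite | github.com/tompulse/pulselead | process_new_prospects.py | get_secteur_from_naf
-- ===== SOURCE A (Python) =====
-- from typing import Optional, Tuple, Dict, List
--
-- SECTEUR_TO_NAF_SECTIONS = {
--     'Alimentaire': ['10', '11'],
--     'BTP & Construction': ['16', '23', '41', '42', '43'],
--     'Automobile': ['29', '30', '45'],
--     'Commerce & Distribution': ['46', '47'],
--     'Hôtellerie & Restauration': ['55', '56'],
--     'Transport & Logistique': ['49', '50', '51', '52', '53'],
--     'Informatique & Digital': ['58', '59', '60', '61', '62', '63'],
--     'Santé & Médical': ['86', '87', '88'],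
--     'Services personnels': ['95', '96'],
--     'Autres': ['01', '02', '03', '05', '06', '07', '08', '09', '12', '13', '14',
--                '15', '17', '18', '19', '20', '21', '22', '24', '25', '26', '27',
--                '28', '31', '32', '33', '35', '36', '37', '38', '39', '64', '65',
--                '66', '68', '69', '70', '71', '72', '73', '74', '75', '77', '78',
--                '79', '80', '81', '82', '84', '85', '90', '91', '92', '93', '94',
--                '97', '98', '99']
-- }
--
-- def get_secteur_from_naf(code_naf: Optional[str]) -> str:
--     """Détermine le secteur d'activité selon le code NAF"""
--     if not code_naf or code_naf == '' or code_naf == 'null':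
--         return 'Autres'
--
--     # Extraire les 2 premiers chiffres (section NAF)
--     section = code_naf.replace('.', '').replace(' ', '')[:2]
--
--     for secteur, sections in SECTEUR_TO_NAF_SECTIONS.items():
--         if section in sections:
--             return secteur
--
--     return 'Autres'
-- ===== SOURCE B (Python) =====
-- def get_secteur_from_naf(code_naf):
--     """Détermine le secteur d'activité selon le code NAF
--     (classification arithmétique par plages de numéros de division NAF,
--     au lieu d'un balayage de listes de chaînes)."""
--     if not code_naf or code_naf == 'null':
--         return 'Autres'
--     t = code_naf.replace('.', '').replace(' ', '')[:2]
--     if len(t) == 2 and t[0].isdigit() and t[1].isdigit():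
--         n = 10 * (ord(t[0]) - 48) + (ord(t[1]) - 48)
--         if 10 <= n <= 11:
--             return 'Alimentaire'
--         if n == 16 or n == 23 or 41 <= n <= 43:
--             return 'BTP & Construction'
--         if n == 29 or n == 30 or n == 45:
--             return 'Automobile'
--         if 46 <= n <= 47:
--             return 'Commerce & Distribution'
--         if 49 <= n <= 53:
--             return 'Transport & Logistique'
--         if 55 <= n <= 56:
--             return 'Hôtellerie & Restauration'
--         if 58 <= n <= 63:
--             return 'Informatique & Digital'
--         if 86 <= n <= 88:
--             return 'Santé & Médical'
--         if n == 95 or n == 96: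
--             return 'Services personnels'
--     return 'Autres'
-- ===== Notes on version B (the rewrite author's own statement) =====
-- stated objective: alternative
-- what changed: Instead of scanning each secteur's list of two-digit section strings for membership, B parses the two leading characters as a number and classifies it by arithmetic range comparisons (10<=n<=11, 41<=n<=43, ...), with any non-two-digit prefix falling through to 'Autres'; no table is consulted at all.
import Mathlib
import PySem

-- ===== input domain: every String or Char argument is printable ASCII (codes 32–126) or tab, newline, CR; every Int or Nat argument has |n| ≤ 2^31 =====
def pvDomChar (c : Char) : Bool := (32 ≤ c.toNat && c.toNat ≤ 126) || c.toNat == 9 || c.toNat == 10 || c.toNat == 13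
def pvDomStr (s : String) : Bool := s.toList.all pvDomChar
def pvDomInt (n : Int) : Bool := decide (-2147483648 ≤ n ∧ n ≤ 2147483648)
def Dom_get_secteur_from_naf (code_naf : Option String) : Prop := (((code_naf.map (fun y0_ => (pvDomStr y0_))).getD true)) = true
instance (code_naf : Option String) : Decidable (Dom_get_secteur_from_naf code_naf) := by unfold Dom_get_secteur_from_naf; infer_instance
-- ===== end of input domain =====

-- B replaces A's scan over lists of two-digit section strings by arithmetic range
-- classification of the numeric value of the two leading digits (alternative algorithm).


-- ===== PORT A =====
-- module constant SECTEUR_TO_NAF_SECTIONS (a dict literal; unique keys)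
def SECTEUR_TO_NAF_SECTIONS : PySem.Dict String (List String) := PySem.Dict.ofList [
  ("Alimentaire", ["10", "11"]),
  ("BTP & Construction", ["16", "23", "41", "42", "43"]),
  ("Automobile", ["29", "30", "45"]),
  ("Commerce & Distribution", ["46", "47"]),
  ("Hôtellerie & Restauration", ["55", "56"]),
  ("Transport & Logistique", ["49", "50", "51", "52", "53"]),
  ("Informatique & Digital", ["58", "59", "60", "61", "62", "63"]),
  ("Santé & Médical", ["86", "87", "88"]),
  ("Services personnels", ["95", "96"]),
  ("Autres", ["01", "02", "03", "05", "06", "07", "08", "09", "12", "13", "14",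
              "15", "17", "18", "19", "20", "21", "22", "24", "25", "26", "27",
              "28", "31", "32", "33", "35", "36", "37", "38", "39", "64", "65",
              "66", "68", "69", "70", "71", "72", "73", "74", "75", "77", "78",
              "79", "80", "81", "82", "84", "85", "90", "91", "92", "93", "94",
              "97", "98", "99"])]

-- A's for-loop over SECTEUR_TO_NAF_SECTIONS.items(): first secteur whose list contains the section, else 'Autres'
def scanSecteurs : List (String × List String) → String → String
  | [], _ => "Autres"
  | (secteur, sections) :: rest, section_ =>
      if sections.contains section_ then secteur else scanSecteurs rest section_

def get_secteur_from_naf (code_naf : Option String) : String :=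
  match code_naf with
  | none => "Autres"
  | some s =>
      if s = "" ∨ s = "null" then "Autres"
      else
        let section_ := PySem.Str.slice (PySem.Str.replace (PySem.Str.replace s "." "") " " "") none (some 2)
        scanSecteurs SECTEUR_TO_NAF_SECTIONS.items section_

-- ===== PORT B =====
-- B's if-chain of arithmetic range tests on n = value of the two leading digits
def classifyNaf (n : Int) : String :=
  if 10 ≤ n ∧ n ≤ 11 then "Alimentaire"
  else if n = 16 ∨ n = 23 ∨ (41 ≤ n ∧ n ≤ 43) then "BTP & Construction"
  else if n = 29 ∨ n = 30 ∨ n = 45 then "Automobile"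
  else if 46 ≤ n ∧ n ≤ 47 then "Commerce & Distribution"
  else if 49 ≤ n ∧ n ≤ 53 then "Transport & Logistique"
  else if 55 ≤ n ∧ n ≤ 56 then "Hôtellerie & Restauration"
  else if 58 ≤ n ∧ n ≤ 63 then "Informatique & Digital"
  else if 86 ≤ n ∧ n ≤ 88 then "Santé & Médical"
  else if n = 95 ∨ n = 96 then "Services personnels"
  else "Autres"

-- len(t) == 2 and t[0].isdigit() and t[1].isdigit() → classify 10*(ord(t[0])-48)+(ord(t[1])-48); else 'Autres'
def classifyPrefix (t : List Char) : String :=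
  match t with
  | [a, b] =>
      if PySem.Chars.isdigit a && PySem.Chars.isdigit b then
        classifyNaf (10 * ((a.toNat : Int) - 48) + ((b.toNat : Int) - 48))
      else "Autres"
  | _ => "Autres"

def get_secteur_from_naf_alt (code_naf : Option String) : String :=
  match code_naf with
  | none => "Autres"
  | some s =>
      if s = "" ∨ s = "null" then "Autres"
      else
        let t := PySem.Str.slice (PySem.Str.replace (PySem.Str.replace s "." "") " " "") none (some 2)
        classifyPrefix t.toList

-- ===== PRECONDITION & SPEC =====
def Spec_get_secteur_from_naf (code_naf : Option String) (out : String) : Prop := out = get_secteur_from_naf_alt code_naf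
instance (code_naf : Option String) (out : String) : Decidable (Spec_get_secteur_from_naf code_naf out) := by unfold Spec_get_secteur_from_naf; infer_instance

-- ===== CLAIM =====
def Claim_equal_get_secteur_from_naf : Prop := ∀ (code_naf : Option String), Dom_get_secteur_from_naf code_naf → Spec_get_secteur_from_naf code_naf (get_secteur_from_naf code_naf)

-- ===== LEMMAS AND PROOFS =====

set_option maxRecDepth 100000
set_option maxHeartbeats 1000000

lemma classifyPrefix_pair (a b : Char) :
    classifyPrefix [a, b] =
      if PySem.Chars.isdigit a && PySem.Chars.isdigit b then
        classifyNaf (10 * ((a.toNat : Int) - 48) + ((b.toNat : Int) - 48))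
      else "Autres" := rfl

-- a string of exactly two ASCII digits, as a Bool on the char list
def twoDigitL : List Char → Bool
  | [a, b] => PySem.Chars.isdigit a && PySem.Chars.isdigit b
  | _ => false

lemma isdigit_bounds (c : Char) (h : PySem.Chars.isdigit c = true) :
    48 ≤ c.toNat ∧ c.toNat ≤ 57 := by
  unfold PySem.Chars.isdigit at h
  simp only [Bool.and_eq_true, decide_eq_true_eq, Char.le_def, UInt32.le_iff_toNat_le] at h
  have h0 : '0'.val.toNat = 48 := rfl
  have h9 : '9'.val.toNat = 57 := rfl
  exact ⟨h0 ▸ h.1, h9 ▸ h.2⟩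

-- every section code in A's table is a two-digit string
lemma table_codes_twoDigit :
    ∀ p ∈ SECTEUR_TO_NAF_SECTIONS.items, ∀ c ∈ p.2, twoDigitL c.toList = true := by decide

-- A's scan returns 'Autres' on any string that is not two digits
lemma scan_autres (sct : String) (hs : twoDigitL sct.toList = false) :
    ∀ tbl : List (String × List String),
      (∀ p ∈ tbl, ∀ c ∈ p.2, twoDigitL c.toList = true) → scanSecteurs tbl sct = "Autres" := by
  intro tbl
  induction tbl with
  | nil => intro _; rfl
  | cons p rest ih =>
      intro h
      obtain ⟨secteur, sections⟩ := p
      have hcon : sections.contains sct = false := by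
        cases hc : sections.contains sct with
        | false => rfl
        | true =>
            have hmem : sct ∈ sections := List.contains_iff_mem.mp hc
            have := h _ List.mem_cons_self sct hmem
            rw [hs] at this
            exact absurd this (by simp)
      simp only [scanSecteurs, hcon, Bool.false_eq_true, if_false]
      exact ih (fun q hq => h q (List.mem_cons_of_mem _ hq))

-- finite check: on every two-digit string the scan agrees with the arithmetic classification
lemma scan_digits :
    ∀ i ∈ List.range 10, ∀ j ∈ List.range 10,
      scanSecteurs SECTEUR_TO_NAF_SECTIONS.items
          (String.ofList [Char.ofNat (48 + i), Char.ofNat (48 + j)])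
        = classifyNaf (10 * (i : Int) + (j : Int)) := by decide

-- main lemma: scan = classifyPrefix on every string
lemma scan_eq_classify (sct : String) :
    scanSecteurs SECTEUR_TO_NAF_SECTIONS.items sct = classifyPrefix sct.toList := by
  by_cases h2 : twoDigitL sct.toList = true
  · obtain ⟨a, b, hab, ha, hb⟩ : ∃ a b, sct.toList = [a, b] ∧
        PySem.Chars.isdigit a = true ∧ PySem.Chars.isdigit b = true := by
      unfold twoDigitL at h2
      match hl : sct.toList with
      | [a, b] =>
          rw [hl] at h2
          exact ⟨a, b, rfl, (Bool.and_eq_true _ _).mp h2 |>.1, (Bool.and_eq_true _ _).mp h2 |>.2⟩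
      | [] => rw [hl] at h2; exact absurd h2 (by decide)
      | [a] => rw [hl] at h2; exact absurd h2 (by simp at h2)
      | a :: b :: c :: l => rw [hl] at h2; exact absurd h2 (by simp at h2)
    have hA := isdigit_bounds a ha
    have hB := isdigit_bounds b hb
    have hsct : sct = String.ofList [Char.ofNat (48 + (a.toNat - 48)), Char.ofNat (48 + (b.toNat - 48))] := by
      have h48a : 48 + (a.toNat - 48) = a.toNat := by omega
      have h48b : 48 + (b.toNat - 48) = b.toNat := by omega
      rw [h48a, h48b, Char.ofNat_toNat, Char.ofNat_toNat, ← hab]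
      simp
    have hkey := scan_digits (a.toNat - 48) (List.mem_range.mpr (by omega))
      (b.toNat - 48) (List.mem_range.mpr (by omega))
    rw [hsct, hkey]
    have htl : (String.ofList [Char.ofNat (48 + (a.toNat - 48)), Char.ofNat (48 + (b.toNat - 48))]).toList
        = [a, b] := by
      have h48a : 48 + (a.toNat - 48) = a.toNat := by omega
      have h48b : 48 + (b.toNat - 48) = b.toNat := by omega
      rw [h48a, h48b, Char.ofNat_toNat, Char.ofNat_toNat]
      simp
    rw [htl]
    rw [classifyPrefix_pair]
    simp only [ha, hb, Bool.and_self, if_true]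
    congr 1
    omega
  · have hf : twoDigitL sct.toList = false := Bool.not_eq_true _ |>.mp h2
    rw [scan_autres sct hf _ table_codes_twoDigit]
    cases hl : sct.toList with
    | nil => rfl
    | cons a l =>
        cases l with
        | nil => rfl
        | cons b l2 =>
            cases l2 with
            | nil =>
                rw [hl] at hf
                simp only [twoDigitL] at hf
                rw [classifyPrefix_pair, hf]
                simp
            | cons c l3 => rfl

-- ===== VERDICT =====
theorem get_secteur_from_naf_spec : Claim_equal_get_secteur_from_naf := by
  intro code_naf _
  unfold Spec_get_secteur_from_naf get_secteur_from_naf get_secteur_from_naf_alt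
  cases code_naf with
  | none => rfl
  | some s =>
      by_cases h : s = "" ∨ s = "null"
      · simp [h]
      · simp only [h, if_false]
        exact scan_eq_classify _
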